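-- pv_equiv track=rewrite | github.com/LUISGM1501/Compiladores | Etapa1/codigo/contenidoBruto/scanner/utils/cantidadComentarios.py | contar_comentarios_bloque
-- ===== SOURCE A (Python) =====
-- def contar_comentarios_bloque(texto):
--     """
--     Cuenta la cantidad de bloques de comentarios que empiezan con '$*' y terminan con '*$'.
--     No importa si hay saltos de línea dentro del comentario.
--     """
--     contador = 0
--     indice = 0
--     longitud = len(texto)
--
--     while indice < longitud:
--         inicio = texto.find('$*', indice)
--         if inicio == -1:
--             break  # No hay más bloques
--
--         fin = texto.find('*$', inicio + 2)
--         if fin == -1: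
--             break  # No se encontró el cierre
--
--         contador += 1
--         indice = fin + 2  # Avanzar después del cierre '*$'
--
--     return contador
-- ===== SOURCE B (Python) =====
-- def contar_comentarios_bloque(texto):
--     """Single left-to-right pass with a 4-state automaton instead of repeated str.find scans."""
--     contador = 0
--     estado = 0  # 0: fuera; 1: fuera, visto '$'; 2: dentro; 3: dentro, visto '*'
--     for c in texto:
--         if estado == 0:
--             if c == '$':
--                 estado = 1
--         elif estado == 1:
--             if c == '*':
--                 estado = 2
--             elif c != '$':
--                 estado = 0
--         elif estado == 2:
--             if c == '*':
--                 estado = 3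
--         else:
--             if c == '$':
--                 contador += 1
--                 estado = 0
--             elif c != '*':
--                 estado = 2
--     return contador
-- ===== Notes on version B (the rewrite author's own statement) =====
-- stated objective: alternative
-- what changed: Replaced the while-loop of repeated str.find('$*')/str.find('*$') index jumps by a single left-to-right pass over the characters with a 4-state automaton (outside / seen '$' / inside / seen '*').
import Mathlib
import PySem

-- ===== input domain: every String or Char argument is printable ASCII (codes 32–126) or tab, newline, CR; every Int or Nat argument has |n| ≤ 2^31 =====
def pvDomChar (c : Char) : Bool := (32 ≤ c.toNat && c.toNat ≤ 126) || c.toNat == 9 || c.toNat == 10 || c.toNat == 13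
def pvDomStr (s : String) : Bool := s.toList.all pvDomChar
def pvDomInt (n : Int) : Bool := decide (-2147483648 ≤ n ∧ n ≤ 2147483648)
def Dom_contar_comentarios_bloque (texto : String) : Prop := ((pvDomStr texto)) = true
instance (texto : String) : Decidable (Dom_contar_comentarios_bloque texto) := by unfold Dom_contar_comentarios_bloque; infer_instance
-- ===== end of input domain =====

-- B replaces A's while-loop of repeated str.find('$*')/str.find('*$') index jumps by one
-- left-to-right pass with a 4-state automaton; same return value, similar cost (alternative).

-- ===== PORT A =====
-- Three facts cited by the port's decreasing_by: find/findFrom never return a hit before the start index.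
theorem pvFind_go_ge (sub : List Char) (l : List Char) (k : Nat)
    (h : PySem.Chars.find.go sub l k ≠ -1) : (k : Int) ≤ PySem.Chars.find.go sub l k := by
  induction l generalizing k with
  | nil =>
    by_cases he : sub.isEmpty <;> simp [PySem.Chars.find.go, he] at h ⊢
  | cons c t ih =>
    by_cases hp : sub.isPrefixOf (c :: t) <;> simp [PySem.Chars.find.go, hp] at h ⊢
    have := ih (k + 1) h
    push_cast at this
    omega

theorem pvFind_nonneg (cs sub : List Char) (h : PySem.Chars.find cs sub ≠ -1) :
    0 ≤ PySem.Chars.find cs sub := by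
  unfold PySem.Chars.find at h ⊢
  exact_mod_cast pvFind_go_ge sub cs 0 h

theorem pvFindFrom_ge (s sub : String) (st : Int)
    (h : PySem.Str.findFrom s sub st none ≠ -1) : st ≤ PySem.Str.findFrom s sub st none := by
  have hn : (0:Int) ≤ ↑s.toList.length := by exact_mod_cast Nat.zero_le _
  rw [PySem.Str.findFrom_eq] at h ⊢
  unfold PySem.Chars.findFrom at h ⊢
  simp only at h ⊢
  split_ifs at h ⊢ <;>
    first
      | omega
      | (rename_i hr; have := pvFind_nonneg _ sub.toList hr; omega)

-- the 'while indice < longitud' loop of A, carried state (contador, indice)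
def contarLoopA (texto : String) (longitud : Int) (contador : Int) (indice : Int) : Int :=
  if _h : indice < longitud then
    let inicio := PySem.Str.findFrom texto "$*" indice
    if h1 : inicio = -1 then contador          -- no hay más bloques
    else
      let fin := PySem.Str.findFrom texto "*$" (inicio + 2)
      if h2 : fin = -1 then contador           -- no se encontró el cierre
      else contarLoopA texto longitud (contador + 1) (fin + 2)
  else contador
termination_by (longitud - indice).toNat
decreasing_by
  have ha : indice ≤ PySem.Str.findFrom texto "$*" indice := pvFindFrom_ge _ _ _ h1
  have hb := pvFindFrom_ge texto "*$" (PySem.Str.findFrom texto "$*" indice + 2) h2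
  simp only [inicio, fin] at *
  omega

def contar_comentarios_bloque (texto : String) : Int :=
  contarLoopA texto (PySem.Str.len texto) 0 0

-- ===== PORT B =====
-- one automaton step: estado 0 fuera, 1 fuera tras '$', 2 dentro, 3 dentro tras '*'
def pvStepB (acc : Int × Int) (c : Char) : Int × Int :=
  if acc.2 = 0 then (acc.1, if c = '$' then 1 else 0)
  else if acc.2 = 1 then (acc.1, if c = '*' then 2 else if c = '$' then 1 else 0)
  else if acc.2 = 2 then (acc.1, if c = '*' then 3 else 2)
  else if c = '$' then (acc.1 + 1, 0)
  else (acc.1, if c = '*' then 3 else 2)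

def contar_comentarios_bloque_alt (texto : String) : Int :=
  (texto.toList.foldl pvStepB (0, 0)).1

-- ===== PRECONDITION & SPEC =====
def Spec_contar_comentarios_bloque (texto : String) (out : Int) : Prop := out = contar_comentarios_bloque_alt texto
instance (texto : String) (out : Int) : Decidable (Spec_contar_comentarios_bloque texto out) := by unfold Spec_contar_comentarios_bloque; infer_instance

-- ===== CLAIM (what is proved, stated in full; the proofs are below) =====
def Claim_equal_contar_comentarios_bloque : Prop := ∀ (texto : String), Dom_contar_comentarios_bloque texto → Spec_contar_comentarios_bloque texto (contar_comentarios_bloque texto)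

-- ===== LEMMAS AND PROOFS =====

-- unfolding PySem.Chars.find on a cons cell
theorem pvGo_shift (sub l : List Char) (k : Nat) :
    PySem.Chars.find.go sub l (k+1) = if PySem.Chars.find.go sub l k = -1 then -1 else PySem.Chars.find.go sub l k + 1 := by
  induction l generalizing k with
  | nil =>
    by_cases he : sub.isEmpty
    · simp only [PySem.Chars.find.go, he, if_pos]
      have : ((k:Int)) ≠ -1 := by omega
      simp [this]
    · simp [PySem.Chars.find.go, he]
  | cons c t ih =>
    by_cases hp : sub.isPrefixOf (c :: t)
    · simp only [PySem.Chars.find.go, hp, if_pos]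
      have : ((k:Int)) ≠ -1 := by omega
      simp [this]
    · simp only [PySem.Chars.find.go, hp, if_neg, Bool.false_eq_true, not_false_iff]
      exact ih (k+1)

theorem pvFind_cons (sub : List Char) (c : Char) (t : List Char) :
    PySem.Chars.find (c :: t) sub =
      if sub.isPrefixOf (c :: t) then 0
      else if PySem.Chars.find t sub = -1 then -1 else PySem.Chars.find t sub + 1 := by
  unfold PySem.Chars.find
  by_cases hp : sub.isPrefixOf (c :: t) <;> simp [PySem.Chars.find.go, hp]
  exact pvGo_shift sub t 0

-- step skips: state 1 behaves like state 0 on a non-'*' char; state 3 like state 2 on a non-'$' char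
theorem pvSkip1 (cnt : Int) (c : Char) (h : c ≠ '*') : pvStepB (cnt, 1) c = pvStepB (cnt, 0) c := by
  simp [pvStepB, h]
theorem pvSkip3 (cnt : Int) (c : Char) (h : c ≠ '$') : pvStepB (cnt, 3) c = pvStepB (cnt, 2) c := by
  simp [pvStepB, h]

-- opener not found: from state 0 the count never changes
theorem pvL1 (cs : List Char) : ∀ cnt : Int, PySem.Chars.find cs ['$','*'] = -1 →
    (cs.foldl pvStepB (cnt, 0)).1 = cnt := by
  induction cs with
  | nil => intro cnt _; simp
  | cons c t ih =>
    intro cnt h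
    rw [pvFind_cons] at h
    split_ifs at h with hp hf
    · by_cases hc : c = '$'
      · subst hc
        cases t with
        | nil => simp [pvStepB]
        | cons c' t' =>
          have hc' : c' ≠ '*' := by
            intro hh; subst hh; simp [List.isPrefixOf] at hp
          simp only [List.foldl_cons]
          have e1 : pvStepB (cnt, 0) '$' = (cnt, 1) := by simp [pvStepB]
          rw [e1, pvSkip1 cnt c' hc']
          have := ih cnt hf
          simpa using this
      · have e1 : pvStepB (cnt, 0) c = (cnt, 0) := by simp [pvStepB, hc]
        simp only [List.foldl_cons, e1]
        exact ih cnt hf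
    · exfalso
      have := pvFind_nonneg t ['$','*'] hf
      omega

-- opener found at j: from state 0 we pass to state 2 right after the opener
theorem pvL3 (cs : List Char) : ∀ cnt : Int, PySem.Chars.find cs ['$','*'] ≠ -1 →
    cs.foldl pvStepB (cnt, 0) =
      (cs.drop ((PySem.Chars.find cs ['$','*']).toNat + 2)).foldl pvStepB (cnt, 2) := by
  induction cs with
  | nil => intro cnt h; simp [PySem.Chars.find, PySem.Chars.find.go] at h
  | cons c t ih =>
    intro cnt h
    rw [pvFind_cons] at h ⊢
    by_cases hp : List.isPrefixOf ['$','*'] (c :: t)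
    · simp only [hp, if_pos]
      cases t with
      | nil => simp [List.isPrefixOf] at hp
      | cons c' t' =>
        simp only [List.isPrefixOf, Bool.and_eq_true, beq_iff_eq] at hp
        obtain ⟨rfl, rfl, -⟩ := hp
        simp [pvStepB]
    · simp only [hp, if_neg, Bool.false_eq_true, not_false_iff] at h ⊢
      have hft : PySem.Chars.find t ['$','*'] ≠ -1 := by
        intro hf; simp [hf] at h
      have hnn := pvFind_nonneg t ['$','*'] hft
      simp only [hft, if_neg, not_false_iff]
      have htn : (PySem.Chars.find t ['$','*'] + 1).toNat = (PySem.Chars.find t ['$','*']).toNat + 1 := by omega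
      rw [htn]
      have hdrop : (c :: t).drop ((PySem.Chars.find t ['$','*']).toNat + 1 + 2) =
          t.drop ((PySem.Chars.find t ['$','*']).toNat + 2) := by
        simp [List.drop_succ_cons]
      rw [hdrop]
      by_cases hc : c = '$'
      · subst hc
        cases t with
        | nil => simp [PySem.Chars.find, PySem.Chars.find.go] at hft
        | cons c' t' =>
          have hc' : c' ≠ '*' := by
            intro hh; subst hh; simp [List.isPrefixOf] at hp
          simp only [List.foldl_cons]
          have e1 : pvStepB (cnt, 0) '$' = (cnt, 1) := by simp [pvStepB]
          rw [e1, pvSkip1 cnt c' hc']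
          have := ih cnt hft
          simpa using this
      · have e1 : pvStepB (cnt, 0) c = (cnt, 0) := by simp [pvStepB, hc]
        simp only [List.foldl_cons, e1]
        exact ih cnt hft

-- closer not found: from state 2 the count never changes
theorem pvM1 (cs : List Char) : ∀ cnt : Int, PySem.Chars.find cs ['*','$'] = -1 →
    (cs.foldl pvStepB (cnt, 2)).1 = cnt := by
  induction cs with
  | nil => intro cnt _; simp
  | cons c t ih =>
    intro cnt h
    rw [pvFind_cons] at h
    split_ifs at h with hp hf
    · by_cases hc : c = '*'
      · subst hc
        cases t with
        | nil => simp [pvStepB]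
        | cons c' t' =>
          have hc' : c' ≠ '$' := by
            intro hh; subst hh; simp [List.isPrefixOf] at hp
          simp only [List.foldl_cons]
          have e1 : pvStepB (cnt, 2) '*' = (cnt, 3) := by simp [pvStepB]
          rw [e1, pvSkip3 cnt c' hc']
          have := ih cnt hf
          simpa using this
      · have e1 : pvStepB (cnt, 2) c = (cnt, 2) := by simp [pvStepB, hc]
        simp only [List.foldl_cons, e1]
        exact ih cnt hf
    · exfalso
      have := pvFind_nonneg t ['*','$'] hf
      omega

-- closer found at k: from state 2 we count one block and reset to state 0 after the closer
theorem pvM3 (cs : List Char) : ∀ cnt : Int, PySem.Chars.find cs ['*','$'] ≠ -1 →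
    cs.foldl pvStepB (cnt, 2) =
      (cs.drop ((PySem.Chars.find cs ['*','$']).toNat + 2)).foldl pvStepB (cnt + 1, 0) := by
  induction cs with
  | nil => intro cnt h; simp [PySem.Chars.find, PySem.Chars.find.go] at h
  | cons c t ih =>
    intro cnt h
    rw [pvFind_cons] at h ⊢
    by_cases hp : List.isPrefixOf ['*','$'] (c :: t)
    · simp only [hp, if_pos]
      cases t with
      | nil => simp [List.isPrefixOf] at hp
      | cons c' t' =>
        simp only [List.isPrefixOf, Bool.and_eq_true, beq_iff_eq] at hp
        obtain ⟨rfl, rfl, -⟩ := hp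
        simp [pvStepB]
    · simp only [hp, if_neg, Bool.false_eq_true, not_false_iff] at h ⊢
      have hft : PySem.Chars.find t ['*','$'] ≠ -1 := by
        intro hf; simp [hf] at h
      have hnn := pvFind_nonneg t ['*','$'] hft
      simp only [hft, if_neg, not_false_iff]
      have htn : (PySem.Chars.find t ['*','$'] + 1).toNat = (PySem.Chars.find t ['*','$']).toNat + 1 := by omega
      rw [htn]
      have hdrop : (c :: t).drop ((PySem.Chars.find t ['*','$']).toNat + 1 + 2) =
          t.drop ((PySem.Chars.find t ['*','$']).toNat + 2) := by
        simp [List.drop_succ_cons]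
      rw [hdrop]
      by_cases hc : c = '*'
      · subst hc
        cases t with
        | nil => simp [PySem.Chars.find, PySem.Chars.find.go] at hft
        | cons c' t' =>
          have hc' : c' ≠ '$' := by
            intro hh; subst hh; simp [List.isPrefixOf] at hp
          simp only [List.foldl_cons]
          have e1 : pvStepB (cnt, 2) '*' = (cnt, 3) := by simp [pvStepB]
          rw [e1, pvSkip3 cnt c' hc']
          have := ih cnt hft
          simpa using this
      · have e1 : pvStepB (cnt, 2) c = (cnt, 2) := by simp [pvStepB, hc]
        simp only [List.foldl_cons, e1]
        exact ih cnt hft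

-- a hit of find marks an occurrence: the pattern is a prefix of the drop at the hit
theorem pvFind_prefix (cs sub : List Char) (h : PySem.Chars.find cs sub ≠ -1) :
    sub <+: cs.drop (PySem.Chars.find cs sub).toNat := by
  have h0 : PySem.Chars.findFrom cs sub ((0 : Nat) : Int) none ≠ -1 := by
    simp only [Nat.cast_zero, PySem.Chars.findFrom_zero]; exact h
  have spec := PySem.Chars.findFrom_natCast_spec cs sub 0 (Nat.zero_le _) h0
  simp only [Nat.cast_zero, PySem.Chars.findFrom_zero] at spec
  exact spec.2.1

-- the invariant of A's while-loop: starting at index i in state (cnt, indice=i) it computes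
-- what B's automaton computes on the suffix from i, started in state 0
theorem pvLoopA_eq (texto : String) (i : Nat) (cnt : Int) (hi : i ≤ texto.toList.length) :
    contarLoopA texto (PySem.Str.len texto) cnt i =
      ((texto.toList.drop i).foldl pvStepB (cnt, 0)).1 := by
  rw [contarLoopA]
  rw [PySem.Str.len_eq]
  by_cases hcond : (i : Int) < (texto.toList.length : Int)
  · simp only [hcond, dif_pos]
    have hfe : PySem.Str.findFrom texto "$*" (i : Int) =
        PySem.Chars.findFrom texto.toList ['$','*'] (i : Int) := by
      rw [PySem.Str.findFrom_eq]
      rfl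
    rw [hfe, PySem.Chars.findFrom_natCast texto.toList ['$','*'] i hi]
    by_cases h1 : PySem.Chars.find (texto.toList.drop i) ['$','*'] = -1
    · simp only [if_pos h1]
      rw [dif_pos trivial]
      exact (pvL1 _ cnt h1).symm
    · have hj := pvFind_nonneg _ _ h1
      set j := (PySem.Chars.find (texto.toList.drop i) ['$','*']).toNat with hjdef
      have hjeq : PySem.Chars.find (texto.toList.drop i) ['$','*'] = (j : Int) := by omega
      have hpre := pvFind_prefix _ _ h1
      have hjb : i + j + 2 ≤ texto.toList.length := by
        have := hpre.length_le
        simp only [List.length_drop, List.length_cons, List.length_nil] at this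
        omega
      simp only [if_neg h1]
      have hne : ¬ ((i : Int) + PySem.Chars.find (texto.toList.drop i) ['$','*'] = -1) := by
        omega
      rw [dif_neg hne]
      have hcast : (i : Int) + PySem.Chars.find (texto.toList.drop i) ['$','*'] + 2 = ((i + j + 2 : Nat) : Int) := by
        push_cast; omega
      have hfe2 : PySem.Str.findFrom texto "*$" ((i : Int) + PySem.Chars.find (texto.toList.drop i) ['$','*'] + 2) =
          PySem.Chars.findFrom texto.toList ['*','$'] ((i + j + 2 : Nat) : Int) := by
        rw [PySem.Str.findFrom_eq, hcast]
        rfl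
      rw [hfe2, PySem.Chars.findFrom_natCast texto.toList ['*','$'] (i+j+2) hjb]
      by_cases h2 : PySem.Chars.find (texto.toList.drop (i+j+2)) ['*','$'] = -1
      · rw [if_pos h2]
        rw [dif_pos rfl]
        rw [pvL3 _ cnt h1, hjeq]
        rw [List.drop_drop]
        have : i + (j + 2) = i + j + 2 := by omega
        rw [show (Int.toNat (j:Int)) + 2 = j + 2 from by omega, this]
        exact (pvM1 _ cnt h2).symm
      · have hk := pvFind_nonneg _ _ h2
        set k := (PySem.Chars.find (texto.toList.drop (i+j+2)) ['*','$']).toNat with hkdef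
        have hkeq : PySem.Chars.find (texto.toList.drop (i+j+2)) ['*','$'] = (k : Int) := by omega
        have hpre2 := pvFind_prefix _ _ h2
        have hkb : i + j + 2 + k + 2 ≤ texto.toList.length := by
          have := hpre2.length_le
          simp only [List.length_drop, List.length_cons, List.length_nil] at this
          omega
        simp only [if_neg h2]
        have hne2 : ¬ (((i+j+2 : Nat) : Int) + PySem.Chars.find (texto.toList.drop (i+j+2)) ['*','$'] = -1) := by
          push_cast; omega
        rw [dif_neg hne2]
        have hcast2 : ((i+j+2 : Nat) : Int) + PySem.Chars.find (texto.toList.drop (i+j+2)) ['*','$'] + 2 =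
            ((i + j + 2 + k + 2 : Nat) : Int) := by push_cast; omega
        rw [hcast2]
        have hrec := pvLoopA_eq texto (i+j+2+k+2) (cnt+1) hkb
        rw [PySem.Str.len_eq] at hrec
        rw [hrec]
        rw [pvL3 _ cnt h1, hjeq, List.drop_drop,
          show (Int.toNat (j:Int)) + 2 = j + 2 from by omega,
          show i + (j + 2) = i + j + 2 from by omega]
        rw [pvM3 _ cnt h2, hkeq, List.drop_drop,
          show (Int.toNat (k:Int)) + 2 = k + 2 from by omega,
          show i + j + 2 + (k + 2) = i + j + 2 + k + 2 from by omega]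
  · have : i = texto.toList.length := by omega
    subst this
    rw [dif_neg hcond]
    rw [List.drop_length]
    simp
termination_by texto.toList.length - i
decreasing_by omega

-- ===== VERDICT (by name: the statement is the Claim_ definition above) =====
theorem contar_comentarios_bloque_spec : Claim_equal_contar_comentarios_bloque := by
  intro texto _
  unfold Spec_contar_comentarios_bloque contar_comentarios_bloque contar_comentarios_bloque_alt
  have := pvLoopA_eq texto 0 0 (Nat.zero_le _)
  simpa using this
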